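-- pv_equiv track=rewrite | github.com/mbarakaja/codility-lessons | lesson4/max_counters.py | solution
-- ===== SOURCE A (Python) =====
-- def solution(N, A):
--     """Detected time complexity: O(N + M)
--
--     https://app.codility.com/demo/results/training5XAUZ7-3RQ/?showingAll=1
--     """
--
--     counters = [0] * N
--     _max = 0
--     _min = _max
--
--     for item in A:
--         if item == N + 1:
--             _min = _max
--             continue
--
--         J = item - 1
--
--         if counters[J] < _min:
--             counters[J] = _min
--
--         counters[J] += 1
--
--         if counters[J] > _max:
--             _max = counters[J]
--
--     for index, value in enumerate(counters):
--         if value < _min: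
--             counters[index] = _min
--
--     return counters
-- ===== SOURCE B (Python) =====
-- def solution(N, A):
--     base = 0
--     counts = [0] * N
--     for x in A:
--         if x == N + 1:
--             base += max(counts, default=0)
--             counts = [0] * N
--         else:
--             counts[x - 1] += 1
--     return [base + c for c in counts]
-- ===== Notes on version B (the rewrite author's own statement) =====
-- stated objective: simpler
-- what changed: Replaces A's lazy _min floor technique (deferred threshold applied at each read plus a trailing sweep) with a base-offset decomposition: a running base accumulates max(counts, default=0) at every max-counter operation, per-segment counts restart at zero, and the result is one base+count map with no floor bookkeeping.
import Mathlib
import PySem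

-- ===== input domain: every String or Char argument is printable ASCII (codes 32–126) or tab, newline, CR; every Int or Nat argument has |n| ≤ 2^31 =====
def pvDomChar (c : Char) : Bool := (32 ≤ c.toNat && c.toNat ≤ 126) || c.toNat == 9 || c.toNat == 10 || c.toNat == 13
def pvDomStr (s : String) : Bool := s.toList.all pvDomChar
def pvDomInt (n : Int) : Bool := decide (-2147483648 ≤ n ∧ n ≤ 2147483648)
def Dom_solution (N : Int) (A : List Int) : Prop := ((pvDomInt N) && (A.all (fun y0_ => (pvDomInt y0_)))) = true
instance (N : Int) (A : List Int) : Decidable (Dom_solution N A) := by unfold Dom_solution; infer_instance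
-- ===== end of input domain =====

-- B replaces A's lazy _min floor (deferred threshold + final sweep) with a base-offset/segment
-- decomposition: a running base raised by max(counts) at each reset, fresh per-segment counts,
-- and a final base+count map; simpler, same return value wherever A returns.


-- ===== PORT A =====
-- loop body of A: state = (counters, _max, _min)
def solStepA (N : Int) (st : List Int × Int × Int) (item : Int) : List Int × Int × Int :=
  if item = N + 1 then (st.1, st.2.1, st.2.1)
  else
    match PySem.List.pyGet? st.1 (item - 1) with
    | none => st   -- IndexError in Python; excluded by Pre_solution
    | some c0 =>
      let c1 := if c0 < st.2.2 then st.2.2 else c0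
      let c2 := c1 + 1
      (PySem.List.pySetD st.1 (item - 1) c2, (if c2 > st.2.1 then c2 else st.2.1), st.2.2)

def solution (N : Int) (A : List Int) : List Int :=
  let st := A.foldl (solStepA N) (List.replicate N.toNat 0, 0, 0)
  st.1.map (fun v => if v < st.2.2 then st.2.2 else v)

-- ===== PORT B =====
-- loop body of B: state = (base, counts); a reset folds max(counts, default=0) into base
def solStepB (N : Int) (st : Int × List Int) (x : Int) : Int × List Int :=
  if x = N + 1 then (st.1 + PySem.List.maxD st.2 (fun v => v) 0, List.replicate N.toNat 0)
  else
    match PySem.List.pyGet? st.2 (x - 1) with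
    | none => st   -- IndexError in Python; excluded by Pre_solution
    | some c => (st.1, PySem.List.pySetD st.2 (x - 1) (c + 1))

def solution_alt (N : Int) (A : List Int) : List Int :=
  let st := A.foldl (solStepB N) (0, List.replicate N.toNat 0)
  st.2.map (fun c => st.1 + c)

-- ===== PRECONDITION & SPEC =====
-- Pre_ excludes exactly the inputs on which the Python A raises IndexError
-- (an item that is neither N+1 nor a valid, possibly negative, Python index into the N counters).
def Pre_solution (N : Int) (A : List Int) : Prop :=
  ∀ item ∈ A, item = N + 1 ∨ PySem.Raise.InRange N.toNat (item - 1)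
instance (N : Int) (A : List Int) : Decidable (Pre_solution N A) := by
  unfold Pre_solution PySem.Raise.InRange; infer_instance

def pvWitness_solution : Int × List Int := (5, [3, 4, 4, 6, 1, 4, 4])

def Spec_solution (N : Int) (A : List Int) (out : List Int) : Prop := out = solution_alt N A
instance (N : Int) (A : List Int) (out : List Int) : Decidable (Spec_solution N A out) := by unfold Spec_solution; infer_instance

-- ===== CLAIM (what is proved, stated in full; the proofs are below) =====
def Claim_equal_solution : Prop := ∀ (N : Int) (A : List Int), Dom_solution N A → Pre_solution N A → Spec_solution N A (solution N A)

-- ===== LEMMAS AND PROOFS =====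

-- the lazy-floor application A performs on reads and in its final sweep
def pvFloor (mn : Int) (v : Int) : Int := if v < mn then mn else v

-- max(counts, default=0) as B computes it
def pvMaxD0 (l : List Int) : Int := PySem.List.maxD l (fun v => v) 0

lemma pvMaxD0_replicate (n : Nat) : pvMaxD0 (List.replicate n 0) = 0 := by
  cases n with
  | zero => rfl
  | succ m =>
    unfold pvMaxD0
    have hne : List.replicate (m + 1) (0 : Int) ≠ [] := by simp
    have h := PySem.List.max?_eq_some_maxD (List.replicate (m + 1) (0 : Int)) (fun v => v) 0 hne
    have hmem := PySem.List.max?_mem h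
    exact List.eq_of_mem_replicate hmem

lemma pvMaxD0_le_of_mem {l : List Int} {v : Int} (hv : v ∈ l) : v ≤ pvMaxD0 l := by
  have hne : l ≠ [] := by rintro rfl; simp at hv
  have h := PySem.List.max?_eq_some_maxD l (fun v => v) 0 hne
  exact PySem.List.max?_isMax h v hv

lemma pvMaxD0_set {l : List Int} {k : Nat} {v : Int} (hk : k < l.length) (hle : l[k] ≤ v) :
    pvMaxD0 (l.set k v) = max (pvMaxD0 l) v := by
  have hne : l ≠ [] := by rintro rfl; simp at hk
  have hne' : l.set k v ≠ [] := by
    intro h; apply hne; simpa using congrArg List.length h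
  have hM := PySem.List.max?_eq_some_maxD l (fun v => v) 0 hne
  have hM' := PySem.List.max?_eq_some_maxD (l.set k v) (fun v => v) 0 hne'
  set m := pvMaxD0 l with hm
  set m' := pvMaxD0 (l.set k v) with hm'
  have hmemM' := PySem.List.max?_mem hM'
  have hmaxM := PySem.List.max?_isMax hM
  have hmaxM' := PySem.List.max?_isMax hM'
  have hvle : v ≤ m' := by
    exact hmaxM' v (List.mem_iff_getElem.mpr ⟨k, by simpa using hk, by simp⟩)
  have hmle : m ≤ m' := by
    have hmemM := PySem.List.max?_mem hM
    obtain ⟨i, hi, hiv⟩ := List.mem_iff_getElem.mp hmemM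
    by_cases hik : i = k
    · subst hik; calc m = l[i] := hiv.symm
        _ ≤ v := hle
        _ ≤ m' := hvle
    · apply le_trans (le_of_eq hiv.symm)
      apply hmaxM' l[i]
      exact List.mem_iff_getElem.mpr ⟨i, by simpa using hi, by rw [List.getElem_set]; simp [Ne.symm hik]⟩
  have hub : m' ≤ max m v := by
    rcases List.mem_or_eq_of_mem_set hmemM' with h | h
    · exact le_trans (hmaxM _ h) (le_max_left _ _)
    · exact h ▸ le_max_right _ _
  omega

-- coupling invariant between A's state and B's state
def pvInv (N : Int) (sA : List Int × Int × Int) (sB : Int × List Int) : Prop :=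
  sA.1.length = N.toNat ∧
  sB.2.length = N.toNat ∧
  sA.1.map (pvFloor sA.2.2) = sB.2.map (fun c => sB.1 + c) ∧
  sA.2.1 = sB.1 + pvMaxD0 sB.2

lemma pvIdx_resolve {len : Nat} {i : Int} (h : PySem.Raise.InRange len i) :
    ∃ k, PySem.List.pyIdx? len i = some k ∧ k < len := by
  obtain ⟨h1, h2⟩ := h
  unfold PySem.List.pyIdx?
  by_cases h0 : 0 ≤ i
  · exact ⟨i.toNat, by rw [if_pos h0, if_pos h2], by omega⟩
  · exact ⟨len - (-i).toNat, by rw [if_neg h0, if_pos h1], by omega⟩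

lemma pvStep_inv (N : Int) (sA : List Int × Int × Int) (sB : Int × List Int) (item : Int)
    (hInv : pvInv N sA sB)
    (hok : item = N + 1 ∨ PySem.Raise.InRange N.toNat (item - 1)) :
    pvInv N (solStepA N sA item) (solStepB N sB item) := by
  obtain ⟨cA, mx, mn⟩ := sA
  obtain ⟨base, cB⟩ := sB
  obtain ⟨hlenA, hlenB, hmap, hmx⟩ := hInv
  simp only at hlenA hlenB hmap hmx
  by_cases hN : item = N + 1
  · -- reset
    have hA : solStepA N (cA, mx, mn) item = (cA, mx, mx) := by simp [solStepA, hN]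
    have hB : solStepB N (base, cB) item
        = (base + pvMaxD0 cB, List.replicate N.toNat 0) := by
      simp [solStepB, hN, pvMaxD0]
    rw [hA, hB]
    refine ⟨hlenA, by simp, ?_, by simp [pvMaxD0_replicate, hmx]⟩
    -- cA.map (pvFloor mx) = (replicate n 0).map (base' + ·) = replicate n mx
    simp only [List.map_replicate, add_zero]
    apply List.ext_getElem (by simp [hlenA])
    intro i hi hi'
    have hiA : i < cA.length := by simpa using hi
    have hiB : i < cB.length := by omega
    have hpt : pvFloor mn cA[i] = base + cB[i] := by
      have := congrArg (fun l => l[i]?) hmap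
      simpa [List.getElem?_eq_getElem, hiA, hiB] using this
    have hle1 : cA[i] ≤ pvFloor mn cA[i] := by unfold pvFloor; split_ifs <;> omega
    have hle2 : cB[i] ≤ pvMaxD0 cB := pvMaxD0_le_of_mem (List.getElem_mem hiB)
    simp only [List.getElem_map, List.getElem_replicate]
    unfold pvFloor
    split_ifs <;> omega
  · -- increment at python index item-1
    have hrange : PySem.Raise.InRange N.toNat (item - 1) := hok.resolve_left hN
    obtain ⟨k, hk, hklt⟩ := pvIdx_resolve hrange
    have hkA : k < cA.length := by omega
    have hkB : k < cB.length := by omega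
    have hgetA : PySem.List.pyGet? cA (item - 1) = some cA[k] := by
      simp [PySem.List.pyGet?, hlenA, hk, List.getElem?_eq_getElem hkA]
    have hgetB : PySem.List.pyGet? cB (item - 1) = some cB[k] := by
      simp [PySem.List.pyGet?, hlenB, hk, List.getElem?_eq_getElem hkB]
    have hpt : pvFloor mn cA[k] = base + cB[k] := by
      have := congrArg (fun l => l[k]?) hmap
      simpa [List.getElem?_eq_getElem, hkA, hkB] using this
    set c2 : Int := (if cA[k] < mn then mn else cA[k]) + 1 with hc2
    have hc2' : c2 = pvFloor mn cA[k] + 1 := by rw [hc2]; rfl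
    have hA : solStepA N (cA, mx, mn) item
        = (cA.set k c2, (if c2 > mx then c2 else mx), mn) := by
      simp only [solStepA, if_neg hN, hgetA, PySem.List.pySetD, PySem.List.pySet?, hlenA, hk]
      rfl
    have hB : solStepB N (base, cB) item
        = (base, cB.set k (cB[k] + 1)) := by
      simp only [solStepB, if_neg hN, hgetB, PySem.List.pySetD, PySem.List.pySet?, hlenB, hk]
      rfl
    rw [hA, hB]
    have hc2B : c2 = base + (cB[k] + 1) := by omega
    refine ⟨by simpa using hlenA, by simpa using hlenB, ?_, ?_⟩
    · simp only [List.map_set]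
      rw [hmap]
      congr 1
      have : ¬ (c2 < mn) := by
        have : mn ≤ pvFloor mn cA[k] := by unfold pvFloor; split_ifs <;> omega
        omega
      unfold pvFloor
      rw [if_neg this]
      omega
    · simp only
      have hset : pvMaxD0 (cB.set k (cB[k] + 1)) = max (pvMaxD0 cB) (cB[k] + 1) :=
        pvMaxD0_set hkB (by omega)
      rw [hset]
      have hle2 : cB[k] ≤ pvMaxD0 cB := pvMaxD0_le_of_mem (List.getElem_mem hkB)
      split_ifs <;> omega

lemma pvFold_inv (N : Int) (L : List Int) (sA : List Int × Int × Int) (sB : Int × List Int)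
    (hInv : pvInv N sA sB)
    (hok : ∀ item ∈ L, item = N + 1 ∨ PySem.Raise.InRange N.toNat (item - 1)) :
    pvInv N (L.foldl (solStepA N) sA) (L.foldl (solStepB N) sB) := by
  induction L generalizing sA sB with
  | nil => exact hInv
  | cons x xs ih =>
    simp only [List.foldl_cons]
    exact ih _ _ (pvStep_inv N sA sB x hInv (hok x (List.mem_cons_self)))
      (fun item h => hok item (List.mem_cons_of_mem _ h))

-- ===== VERDICT (by name: the statement is the Claim_ definition above) =====
theorem solution_spec : Claim_equal_solution := by
  intro N A _hdom hpre
  unfold Spec_solution solution solution_alt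
  have hInv0 : pvInv N (List.replicate N.toNat 0, 0, 0) (0, List.replicate N.toNat 0) := by
    refine ⟨by simp, by simp, by simp [pvFloor], by simp [pvMaxD0_replicate]⟩
  have h := pvFold_inv N A _ _ hInv0 hpre
  obtain ⟨_, _, hmap, _⟩ := h
  exact hmap
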